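-- pv_equiv track=rewrite | github.com/Ezra-Alexander/sample_work | geom_helper.py | local_equivalence_test
-- ===== SOURCE A (Python) =====
-- from collections import Counter
--
-- def local_equivalence_test(atom1,atom2,atoms,connectivity):
--     '''
--
--     In these large nanocrystals where symmetry isn't really a factor
--     We have this idea that certain atoms are locally the same
--     If they have similar coordination environments
--
--     This function determines if two given atoms in a nanocrystal are locally identical
--     We consider the local environment up to second nearest neighbors
--     Which is to say we consider the atomic species and coordination number of each atom within next nearest neighbors
--     Whwere atoms in the second coordination shell are tagged by the element and neighbor they passed through
--
--     Inputs:
--         atom1/atom2: int, overall index of atom 1 / atom 2 (zero-based)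
--         atoms: np array of element labels, in order. NAtoms long
--         connectivity: np array that forms a connectivity graph, based on bonding cutoffs. NAtoms x NAtoms
--     Outputs:
--         Boolean. True if the two atoms are locally equivalent
--     '''
--
--     if atoms[atom1]!=atoms[atom2]: #if the elements are different
--         return False
--
--     if len(connectivity[atom1])!=len(connectivity[atom2]): #if the coordination number is different
--         return False
--
--     atom1_bonds=[]
--     for element in connectivity[atom1]:
--         atom1_bonds.append(atoms[element])
--
--     atom2_bonds=[]
--     for element in connectivity[atom2]:
--         atom2_bonds.append(atoms[element])
--
--     if Counter(atom1_bonds) != Counter(atom2_bonds): #if the coordinated elements are different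
--         return False
--
--     atom1_nn =[[atoms[x],len(connectivity[x])] for x in connectivity[atom1]]
--     atom2_nn =[[atoms[x],len(connectivity[x])] for x in connectivity[atom2]]
--
--     atom1_nn=sorted(atom1_nn)
--     atom2_nn=sorted(atom2_nn)
--
--     if atom1_nn != atom2_nn: #if the coordinated coordination numbers are different
--         return False
--
--
--     atom1_2nn=[]
--     for bond in connectivity[atom1]:
--         for bond2 in connectivity[bond]:
--             if bond2!=atom1:
--                 atom1_2nn.append([atoms[bond],len(connectivity[bond]),atoms[bond2],len(connectivity[bond2])])
--     atom1_2nn=sorted(atom1_2nn)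
--
--     atom2_2nn=[]
--     for bond in connectivity[atom2]:
--         for bond2 in connectivity[bond]:
--             if bond2!=atom2:
--                 atom2_2nn.append([atoms[bond],len(connectivity[bond]),atoms[bond2],len(connectivity[bond2])])
--     atom2_2nn=sorted(atom2_2nn)
--
--     if atom1_2nn!=atom2_2nn:
--         return False
--
--     return True
-- ===== SOURCE B (Python) =====
-- def local_equivalence_test(atom1, atom2, atoms, connectivity):
--     if atoms[atom1] != atoms[atom2]:
--         return False
--     # Signed hash-counting: walk each atom's shells once, incrementing (+1 for
--     # atom1, -1 for atom2) a tally keyed by the local feature tuples; the two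
--     # environments match exactly when every tally cancels to zero.
--     nn = {}
--     nn2 = {}
--     for a, sign in ((atom1, 1), (atom2, -1)):
--         for x in connectivity[a]:
--             key = (atoms[x], len(connectivity[x]))
--             nn[key] = nn.get(key, 0) + sign
--             for y in connectivity[x]:
--                 if y != a:
--                     key2 = (atoms[x], len(connectivity[x]), atoms[y], len(connectivity[y]))
--                     nn2[key2] = nn2.get(key2, 0) + sign
--     return not any(nn.values()) and not any(nn2.values())
-- ===== Notes on version B (the rewrite author's own statement) =====
-- stated objective: alternative
-- what changed: Replaces A's staged sort-and-compare passes (build four lists, sort them, chain five short-circuit checks) by a single interleaved walk over both atoms' shells that signed-counts feature tuples in two hash tables (+1 for atom1, -1 for atom2) and returns whether every tally cancels; no sorting and no intermediate lists at all, since sorted-list equality is exactly multiset equality.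
-- outside the precondition, e.g. on local_equivalence_test(0, 1, ['H', 'H'], [[1, 1], [5]]): A returns False, B raises IndexError
import Mathlib
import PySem

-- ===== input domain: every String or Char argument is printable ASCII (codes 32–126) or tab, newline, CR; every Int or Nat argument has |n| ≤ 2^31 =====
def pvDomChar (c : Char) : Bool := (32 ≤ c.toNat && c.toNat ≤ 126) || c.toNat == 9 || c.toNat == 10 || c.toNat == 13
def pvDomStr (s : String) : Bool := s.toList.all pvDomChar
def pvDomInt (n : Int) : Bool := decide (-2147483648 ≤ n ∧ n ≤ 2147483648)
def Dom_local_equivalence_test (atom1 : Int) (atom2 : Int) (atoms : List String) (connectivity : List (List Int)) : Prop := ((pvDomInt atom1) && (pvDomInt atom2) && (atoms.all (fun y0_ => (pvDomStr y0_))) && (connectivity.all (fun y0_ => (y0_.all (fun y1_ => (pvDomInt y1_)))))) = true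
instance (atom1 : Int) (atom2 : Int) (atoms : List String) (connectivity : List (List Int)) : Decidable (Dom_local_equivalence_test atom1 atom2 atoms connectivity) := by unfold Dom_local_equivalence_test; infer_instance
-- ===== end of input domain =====

-- ===== PORT A =====
-- B replaces A's sort-and-compare passes by signed hash-counting of the same feature tuples;
-- return-value equivalence only (neither version mutates its arguments).

-- Python's dict '==' ignores insertion order (PySem.Dict '=' does not): equal values under getD in both
-- directions. Exact for Counters: a key present on one side only has count ≥ 1 there and getD 0 on the other.
def pyCounterEq (d1 d2 : PySem.Dict String Int) : Bool :=
  d1.keys.all (fun k => d1.getD k 0 == d2.getD k 0) && d2.keys.all (fun k => d1.getD k 0 == d2.getD k 0)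

def local_equivalence_test (atom1 : Int) (atom2 : Int) (atoms : List String) (connectivity : List (List Int)) : Bool :=
  if PySem.List.pyGetD atoms atom1 "" ≠ PySem.List.pyGetD atoms atom2 "" then false
  else if (PySem.List.pyGetD connectivity atom1 []).length ≠ (PySem.List.pyGetD connectivity atom2 []).length then false
  else
    let atom1_bonds := (PySem.List.pyGetD connectivity atom1 []).foldl
      (fun acc element => acc ++ [PySem.List.pyGetD atoms element ""]) []
    let atom2_bonds := (PySem.List.pyGetD connectivity atom2 []).foldl
      (fun acc element => acc ++ [PySem.List.pyGetD atoms element ""]) []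
    if ¬ pyCounterEq (PySem.Dict.counter atom1_bonds) (PySem.Dict.counter atom2_bonds) then false
    else
      let atom1_nn := (PySem.List.pyGetD connectivity atom1 []).map
        (fun x => (PySem.List.pyGetD atoms x "", ((PySem.List.pyGetD connectivity x []).length : Int)))
      let atom2_nn := (PySem.List.pyGetD connectivity atom2 []).map
        (fun x => (PySem.List.pyGetD atoms x "", ((PySem.List.pyGetD connectivity x []).length : Int)))
      let atom1_nn_s := PySem.List.sorted atom1_nn (fun p => toLex p)
      let atom2_nn_s := PySem.List.sorted atom2_nn (fun p => toLex p)
      if atom1_nn_s ≠ atom2_nn_s then false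
      else
        let atom1_2nn := (PySem.List.pyGetD connectivity atom1 []).foldl
          (fun acc bond => (PySem.List.pyGetD connectivity bond []).foldl
            (fun acc2 bond2 =>
              if bond2 != atom1 then
                acc2 ++ [(PySem.List.pyGetD atoms bond "", ((PySem.List.pyGetD connectivity bond []).length : Int),
                          PySem.List.pyGetD atoms bond2 "", ((PySem.List.pyGetD connectivity bond2 []).length : Int))]
              else acc2) acc) []
        let atom2_2nn := (PySem.List.pyGetD connectivity atom2 []).foldl
          (fun acc bond => (PySem.List.pyGetD connectivity bond []).foldl
            (fun acc2 bond2 =>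
              if bond2 != atom2 then
                acc2 ++ [(PySem.List.pyGetD atoms bond "", ((PySem.List.pyGetD connectivity bond []).length : Int),
                          PySem.List.pyGetD atoms bond2 "", ((PySem.List.pyGetD connectivity bond2 []).length : Int))]
              else acc2) acc) []
        let atom1_2nn_s := PySem.List.sorted atom1_2nn (fun t => toLex (t.1, toLex (t.2.1, toLex (t.2.2.1, t.2.2.2))))
        let atom2_2nn_s := PySem.List.sorted atom2_2nn (fun t => toLex (t.1, toLex (t.2.1, toLex (t.2.2.1, t.2.2.2))))
        if atom1_2nn_s ≠ atom2_2nn_s then false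
        else true

-- ===== PORT B =====
-- Source B: one interleaved walk over both atoms' shells, signed-counting feature tuples in two
-- hash tables (+1 for atom1, -1 for atom2); True iff every tally cancels to zero.
def local_equivalence_test_alt (atom1 : Int) (atom2 : Int) (atoms : List String) (connectivity : List (List Int)) : Bool :=
  if PySem.List.pyGetD atoms atom1 "" ≠ PySem.List.pyGetD atoms atom2 "" then false
  else
    let st := [(atom1, (1 : Int)), (atom2, (-1 : Int))].foldl
      (fun st p =>
        (PySem.List.pyGetD connectivity p.1 []).foldl
          (fun st x =>
            ((st.1.modify (PySem.List.pyGetD atoms x "", ((PySem.List.pyGetD connectivity x []).length : Int)) 0 (· + p.2)),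
             (PySem.List.pyGetD connectivity x []).foldl
               (fun d y =>
                 if y != p.1 then
                   d.modify (PySem.List.pyGetD atoms x "", ((PySem.List.pyGetD connectivity x []).length : Int),
                             PySem.List.pyGetD atoms y "", ((PySem.List.pyGetD connectivity y []).length : Int)) 0 (· + p.2)
                 else d) st.2))
          st)
      ((PySem.Dict.empty : PySem.Dict (String × Int) Int),
       (PySem.Dict.empty : PySem.Dict (String × Int × String × Int) Int))
    !(st.1.values.any (fun v => v != 0)) && !(st.2.values.any (fun v => v != 0))

-- ===== PRECONDITION & SPEC =====
-- Pre_ excludes inputs where an index the evaluation touches is out of range: there A raises IndexError,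
-- or A returns False via a later short-circuit check while B's full counting walk raises; when the two
-- elements already differ both programs stop at the element comparison, so only atom1/atom2 are constrained.
def Pre_local_equivalence_test (atom1 : Int) (atom2 : Int) (atoms : List String) (connectivity : List (List Int)) : Prop :=
  PySem.Raise.InRange atoms.length atom1 ∧ PySem.Raise.InRange atoms.length atom2 ∧
  (PySem.List.pyGetD atoms atom1 "" = PySem.List.pyGetD atoms atom2 "" →
    PySem.Raise.InRange connectivity.length atom1 ∧ PySem.Raise.InRange connectivity.length atom2 ∧
    ∀ x ∈ PySem.List.pyGetD connectivity atom1 [] ++ PySem.List.pyGetD connectivity atom2 [],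
      PySem.Raise.InRange atoms.length x ∧ PySem.Raise.InRange connectivity.length x ∧
      ∀ y ∈ PySem.List.pyGetD connectivity x [],
        PySem.Raise.InRange atoms.length y ∧ PySem.Raise.InRange connectivity.length y)
instance (atom1 : Int) (atom2 : Int) (atoms : List String) (connectivity : List (List Int)) : Decidable (Pre_local_equivalence_test atom1 atom2 atoms connectivity) := by unfold Pre_local_equivalence_test; infer_instance

def pvWitness_local_equivalence_test : Int × Int × List String × List (List Int) :=
  (0, 1, ["H", "H"], [[1], [0]])

def Spec_local_equivalence_test (atom1 : Int) (atom2 : Int) (atoms : List String) (connectivity : List (List Int)) (out : Bool) : Prop := out = local_equivalence_test_alt atom1 atom2 atoms connectivity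
instance (atom1 : Int) (atom2 : Int) (atoms : List String) (connectivity : List (List Int)) (out : Bool) : Decidable (Spec_local_equivalence_test atom1 atom2 atoms connectivity out) := by unfold Spec_local_equivalence_test; infer_instance

-- ===== CLAIM (what is proved, stated in full; the proofs are below) =====
def Claim_equal_local_equivalence_test : Prop := ∀ (atom1 : Int) (atom2 : Int) (atoms : List String) (connectivity : List (List Int)), Dom_local_equivalence_test atom1 atom2 atoms connectivity → Pre_local_equivalence_test atom1 atom2 atoms connectivity → Spec_local_equivalence_test atom1 atom2 atoms connectivity (local_equivalence_test atom1 atom2 atoms connectivity)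

-- ===== LEMMAS AND PROOFS =====

-- proof-only abbreviations for the two feature-tuple lists of an atom
def pvNN (atoms : List String) (conn : List (List Int)) (a : Int) : List (String × Int) :=
  (PySem.List.pyGetD conn a []).map
    (fun x => (PySem.List.pyGetD atoms x "", ((PySem.List.pyGetD conn x []).length : Int)))

def pvNN2 (atoms : List String) (conn : List (List Int)) (a : Int) : List (String × Int × String × Int) :=
  (PySem.List.pyGetD conn a []).flatMap
    (fun x => ((PySem.List.pyGetD conn x []).filter (fun y => y != a)).map
      (fun y => (PySem.List.pyGetD atoms x "", ((PySem.List.pyGetD conn x []).length : Int),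
                 PySem.List.pyGetD atoms y "", ((PySem.List.pyGetD conn y []).length : Int))))

-- generic facts about a signed-counting fold
lemma getD_foldl_modify_add (κ : Type) (β : Type) [BEq κ] [LawfulBEq κ] [DecidableEq κ]
    (l : List β) (k : β → κ) (s : Int) (d : PySem.Dict κ Int) (c : κ) :
    (l.foldl (fun d b => d.modify (k b) 0 (· + s)) d).getD c 0
      = d.getD c 0 + s * ((l.map k).count c) := by
  induction l generalizing d with
  | nil => simp
  | cons b t ih =>
    simp only [List.foldl_cons, ih, List.map_cons, List.count_cons]
    rw [PySem.Dict.getD_modify]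
    by_cases h : c = k b
    · subst h; simp; ring
    · have hb : (k b == c) = false := by simp [Ne.symm h]
      simp [h, hb]

-- a fold whose every step preserves Nodup keys preserves it overall
lemma nodup_keys_foldl (κ ν β : Type) [BEq κ] (l : List β)
    (F : PySem.Dict κ ν → β → PySem.Dict κ ν)
    (h : ∀ d b, d.keys.Nodup → (F d b).keys.Nodup)
    (d : PySem.Dict κ ν) (hd : d.keys.Nodup) : (l.foldl F d).keys.Nodup := by
  induction l generalizing d with
  | nil => exact hd
  | cons b t ih => exact ih _ (h d b hd)

lemma nodup_keys_modify (κ ν : Type) [BEq κ] [LawfulBEq κ]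
    (d : PySem.Dict κ ν) (k : κ) (d0 : ν) (f : ν → ν) (h : d.keys.Nodup) :
    (d.modify k d0 f).keys.Nodup := by
  rw [PySem.Dict.keys_modify]
  exact PySem.Dict.nodup_keys_insert _ _ _ h

-- an if-guarded fold is the fold over the filtered list
lemma foldl_if_eq_foldl_filter (α β : Type) (l : List β) (p : β → Bool)
    (g : α → β → α) (a : α) :
    l.foldl (fun a b => if p b then g a b else a) a = (l.filter p).foldl g a := by
  induction l generalizing a with
  | nil => rfl
  | cons b t ih =>
    simp only [List.foldl_cons, List.filter_cons]
    by_cases h : p b <;> simp [h, ih]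

-- "not any nonzero value" for a dict with Nodup keys is "getD is 0 everywhere"
lemma values_any_ne_zero_false_iff (κ : Type) [BEq κ] [LawfulBEq κ] [DecidableEq κ]
    (d : PySem.Dict κ Int) (hnd : d.keys.Nodup) :
    (d.values.any (fun v => v != 0)) = false ↔ ∀ c, d.getD c 0 = 0 := by
  rw [PySem.Dict.values_eq_map_keys d hnd 0]
  simp only [List.any_eq_false, List.mem_map, bne_iff_ne, ne_eq, not_not]
  constructor
  · intro h c
    by_cases hc : c ∈ d.keys
    · exact h _ ⟨c, hc, rfl⟩
    · refine PySem.Dict.getD_of_not_contains d 0 ?_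
      rw [PySem.Dict.contains_eq_decide_mem_keys]; simpa using hc
  · rintro h v ⟨c, _, rfl⟩; exact h c

-- a pair-state fold whose components do not interact splits
lemma foldl_prod_split (α₁ α₂ β : Type) (l : List β)
    (f : α₁ → β → α₁) (g : α₂ → β → α₂) (a₁ : α₁) (a₂ : α₂) :
    l.foldl (fun st b => (f st.1 b, g st.2 b)) (a₁, a₂) = (l.foldl f a₁, l.foldl g a₂) := by
  induction l generalizing a₁ a₂ with
  | nil => rfl
  | cons b t ih => simp [List.foldl_cons, ih]

-- the nested second-shell counting fold, characterised through pvNN2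
lemma getD_nn2_fold (atoms : List String) (conn : List (List Int)) (a : Int) (s : Int)
    (l : List Int) (d : PySem.Dict (String × Int × String × Int) Int) (c : String × Int × String × Int) :
    (l.foldl (fun d x =>
        (PySem.List.pyGetD conn x []).foldl
          (fun d y =>
            if y != a then
              d.modify (PySem.List.pyGetD atoms x "", ((PySem.List.pyGetD conn x []).length : Int),
                        PySem.List.pyGetD atoms y "", ((PySem.List.pyGetD conn y []).length : Int)) 0 (· + s)
            else d) d) d).getD c 0
      = d.getD c 0 + s * ((l.flatMap (fun x => ((PySem.List.pyGetD conn x []).filter (fun y => y != a)).map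
          (fun y => (PySem.List.pyGetD atoms x "", ((PySem.List.pyGetD conn x []).length : Int),
                     PySem.List.pyGetD atoms y "", ((PySem.List.pyGetD conn y []).length : Int))))).count c) := by
  induction l generalizing d with
  | nil => simp
  | cons x t ih =>
    simp only [List.foldl_cons, ih, List.flatMap_cons, List.count_append]
    rw [foldl_if_eq_foldl_filter, getD_foldl_modify_add _ _
      ((PySem.List.pyGetD conn x []).filter (fun y => y != a))
      (fun y => (PySem.List.pyGetD atoms x "", ((PySem.List.pyGetD conn x []).length : Int),
                 PySem.List.pyGetD atoms y "", ((PySem.List.pyGetD conn y []).length : Int))) s d c]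
    push_cast; ring

lemma pyCounterEq_of_perm (xs ys : List String) (h : xs.Perm ys) :
    pyCounterEq (PySem.Dict.counter xs) (PySem.Dict.counter ys) = true := by
  unfold pyCounterEq
  simp only [Bool.and_eq_true, List.all_eq_true]
  constructor <;> intro k _ <;>
    simp [PySem.Dict.getD_counter, h.count_eq]

-- injectivity of the two sort keys used by A
lemma inj_key_nn : Function.Injective (fun p : String × Int => toLex p) :=
  fun _ _ h => toLex.injective h

lemma inj_key_nn2 : Function.Injective
    (fun t : String × Int × String × Int => toLex (t.1, toLex (t.2.1, toLex (t.2.2.1, t.2.2.2)))) := by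
  intro a b h
  have := toLex.injective h
  obtain ⟨h1, h2⟩ := Prod.mk.injEq _ _ _ _ ▸ this
  have := toLex.injective h2
  obtain ⟨h3, h4⟩ := Prod.mk.injEq _ _ _ _ ▸ this
  have := toLex.injective h4
  obtain ⟨h5, h6⟩ := Prod.mk.injEq _ _ _ _ ▸ this
  obtain ⟨x1, x2, x3, x4⟩ := a; obtain ⟨y1, y2, y3, y4⟩ := b
  simp_all

-- A returns true exactly when the element matches and both feature multisets agree
lemma A_true_iff (a1 a2 : Int) (atoms : List String) (conn : List (List Int)) :
    local_equivalence_test a1 a2 atoms conn = true ↔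
      (PySem.List.pyGetD atoms a1 "" = PySem.List.pyGetD atoms a2 "" ∧
       (pvNN atoms conn a1).Perm (pvNN atoms conn a2) ∧
       (pvNN2 atoms conn a1).Perm (pvNN2 atoms conn a2)) := by
  unfold local_equivalence_test
  simp only [PySem.List.foldl_append_singleton_eq_map, PySem.List.foldl_append_if,
    PySem.List.foldl_append_eq_flatMap, List.nil_append]
  constructor
  · intro h
    by_cases h1 : PySem.List.pyGetD atoms a1 "" = PySem.List.pyGetD atoms a2 ""
    · refine ⟨h1, ?_, ?_⟩
      · by_contra hp
        have : PySem.List.sorted (pvNN atoms conn a1) (fun p => toLex p)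
             ≠ PySem.List.sorted (pvNN atoms conn a2) (fun p => toLex p) := by
          intro he
          have p1 := (PySem.List.sorted_perm (pvNN atoms conn a1) (fun p => toLex p) false).symm
          rw [he] at p1
          exact hp (p1.trans (PySem.List.sorted_perm _ _ false))
        simp only [pvNN] at this
        simp [h1, this] at h
      · by_contra hp
        have : PySem.List.sorted (pvNN2 atoms conn a1)
                 (fun t => toLex (t.1, toLex (t.2.1, toLex (t.2.2.1, t.2.2.2))))
             ≠ PySem.List.sorted (pvNN2 atoms conn a2)
                 (fun t => toLex (t.1, toLex (t.2.1, toLex (t.2.2.1, t.2.2.2)))) := by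
          intro he
          have p1 := (PySem.List.sorted_perm (pvNN2 atoms conn a1)
            (fun t => toLex (t.1, toLex (t.2.1, toLex (t.2.2.1, t.2.2.2)))) false).symm
          rw [he] at p1
          exact hp (p1.trans (PySem.List.sorted_perm _ _ false))
        simp only [pvNN2] at this
        split_ifs at h
    · simp [h1] at h
  · rintro ⟨h1, hnn, hnn2⟩
    have hlen : (PySem.List.pyGetD conn a1 []).length = (PySem.List.pyGetD conn a2 []).length := by
      have := hnn.length_eq; simpa [pvNN] using this
    have hpb : ((PySem.List.pyGetD conn a1 []).map (fun e => PySem.List.pyGetD atoms e "")).Perm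
        ((PySem.List.pyGetD conn a2 []).map (fun e => PySem.List.pyGetD atoms e "")) := by
      have := hnn.map Prod.fst
      simpa [pvNN, List.map_map, Function.comp] using this
    have hcnt := pyCounterEq_of_perm _ _ hpb
    have hs1 := PySem.List.sorted_eq_sorted_of_perm _ _ (fun p : String × Int => toLex p) inj_key_nn hnn
    have hs2 := PySem.List.sorted_eq_sorted_of_perm _ _
      (fun t : String × Int × String × Int => toLex (t.1, toLex (t.2.1, toLex (t.2.2.1, t.2.2.2))))
      inj_key_nn2 hnn2
    simp only [pvNN, pvNN2] at hs1 hs2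
    simp [h1, hlen, hcnt, hs1, hs2]

-- B returns true exactly under the same condition
lemma B_true_iff (a1 a2 : Int) (atoms : List String) (conn : List (List Int)) :
    local_equivalence_test_alt a1 a2 atoms conn = true ↔
      (PySem.List.pyGetD atoms a1 "" = PySem.List.pyGetD atoms a2 "" ∧
       (pvNN atoms conn a1).Perm (pvNN atoms conn a2) ∧
       (pvNN2 atoms conn a1).Perm (pvNN2 atoms conn a2)) := by
  unfold local_equivalence_test_alt
  by_cases h1 : PySem.List.pyGetD atoms a1 "" = PySem.List.pyGetD atoms a2 ""
  · -- elements equal: analyse the counting walk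
    simp only [h1, ne_eq, not_true_eq_false, if_false, List.foldl_cons, List.foldl_nil]
    -- split the pair-state fold of each pass into its two independent dict folds
    have hsplit : ∀ (a : Int) (s : Int) (d1 : PySem.Dict (String × Int) Int)
        (d2 : PySem.Dict (String × Int × String × Int) Int),
        (PySem.List.pyGetD conn a []).foldl
          (fun st x =>
            ((st.1.modify (PySem.List.pyGetD atoms x "", ((PySem.List.pyGetD conn x []).length : Int)) 0 (· + s)),
             (PySem.List.pyGetD conn x []).foldl
               (fun d y =>
                 if y != a then
                   d.modify (PySem.List.pyGetD atoms x "", ((PySem.List.pyGetD conn x []).length : Int),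
                             PySem.List.pyGetD atoms y "", ((PySem.List.pyGetD conn y []).length : Int)) 0 (· + s)
                 else d) st.2))
          (d1, d2)
        = ((PySem.List.pyGetD conn a []).foldl
            (fun d x => d.modify (PySem.List.pyGetD atoms x "", ((PySem.List.pyGetD conn x []).length : Int)) 0 (· + s)) d1,
           (PySem.List.pyGetD conn a []).foldl
            (fun d x => (PySem.List.pyGetD conn x []).foldl
               (fun d y =>
                 if y != a then
                   d.modify (PySem.List.pyGetD atoms x "", ((PySem.List.pyGetD conn x []).length : Int),
                             PySem.List.pyGetD atoms y "", ((PySem.List.pyGetD conn y []).length : Int)) 0 (· + s)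
                 else d) d) d2) := by
      intro a s d1 d2
      have h := foldl_prod_split (PySem.Dict (String × Int) Int)
        (PySem.Dict (String × Int × String × Int) Int) Int (PySem.List.pyGetD conn a [])
        (fun d x => d.modify (PySem.List.pyGetD atoms x "", ((PySem.List.pyGetD conn x []).length : Int)) 0 (· + s))
        (fun d x => (PySem.List.pyGetD conn x []).foldl
           (fun d y =>
             if y != a then
               d.modify (PySem.List.pyGetD atoms x "", ((PySem.List.pyGetD conn x []).length : Int),
                         PySem.List.pyGetD atoms y "", ((PySem.List.pyGetD conn y []).length : Int)) 0 (· + s)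
             else d) d)
        d1 d2
      exact h
    rw [hsplit, hsplit]
    -- Nodup keys of both final dicts
    have hnd1 : ((PySem.List.pyGetD conn a2 []).foldl
        (fun d x => d.modify (PySem.List.pyGetD atoms x "", ((PySem.List.pyGetD conn x []).length : Int)) 0 (· + (-1)))
        ((PySem.List.pyGetD conn a1 []).foldl
          (fun d x => d.modify (PySem.List.pyGetD atoms x "", ((PySem.List.pyGetD conn x []).length : Int)) 0 (· + 1))
          PySem.Dict.empty)).keys.Nodup := by
      refine nodup_keys_foldl _ _ _ _ _ (fun d b hd => nodup_keys_modify _ _ _ _ _ _ hd) _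
        (nodup_keys_foldl _ _ _ _ _ (fun d b hd => nodup_keys_modify _ _ _ _ _ _ hd) _
          PySem.Dict.nodup_keys_empty)
    have hstep2 : ∀ (a : Int) (s : Int) (d : PySem.Dict (String × Int × String × Int) Int) (x : Int),
        d.keys.Nodup →
        ((PySem.List.pyGetD conn x []).foldl
           (fun d y =>
             if y != a then
               d.modify (PySem.List.pyGetD atoms x "", ((PySem.List.pyGetD conn x []).length : Int),
                         PySem.List.pyGetD atoms y "", ((PySem.List.pyGetD conn y []).length : Int)) 0 (· + s)
             else d) d).keys.Nodup := by
      intro a s d x hd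
      refine nodup_keys_foldl _ _ _ _ _ (fun d y hdy => ?_) _ hd
      by_cases hy : (y != a) = true
      · simp only [hy, if_true]
        exact nodup_keys_modify _ _ _ _ _ _ hdy
      · simp only [hy]
        exact hdy
    have hnd2 : ((PySem.List.pyGetD conn a2 []).foldl
        (fun d x => (PySem.List.pyGetD conn x []).foldl
           (fun d y =>
             if y != a2 then
               d.modify (PySem.List.pyGetD atoms x "", ((PySem.List.pyGetD conn x []).length : Int),
                         PySem.List.pyGetD atoms y "", ((PySem.List.pyGetD conn y []).length : Int)) 0 (· + (-1))
             else d) d)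
        ((PySem.List.pyGetD conn a1 []).foldl
          (fun d x => (PySem.List.pyGetD conn x []).foldl
             (fun d y =>
               if y != a1 then
                 d.modify (PySem.List.pyGetD atoms x "", ((PySem.List.pyGetD conn x []).length : Int),
                           PySem.List.pyGetD atoms y "", ((PySem.List.pyGetD conn y []).length : Int)) 0 (· + 1)
               else d) d)
          PySem.Dict.empty)).keys.Nodup := by
      refine nodup_keys_foldl _ _ _ _ _ (fun d x hd => hstep2 a2 (-1) d x hd) _
        (nodup_keys_foldl _ _ _ _ _ (fun d x hd => hstep2 a1 1 d x hd) _
          PySem.Dict.nodup_keys_empty)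
    -- getD of the final dicts = signed count difference
    have hg1 : ∀ c, ((PySem.List.pyGetD conn a2 []).foldl
        (fun d x => d.modify (PySem.List.pyGetD atoms x "", ((PySem.List.pyGetD conn x []).length : Int)) 0 (· + (-1)))
        ((PySem.List.pyGetD conn a1 []).foldl
          (fun d x => d.modify (PySem.List.pyGetD atoms x "", ((PySem.List.pyGetD conn x []).length : Int)) 0 (· + 1))
          PySem.Dict.empty)).getD c 0
        = ((pvNN atoms conn a1).count c : Int) - ((pvNN atoms conn a2).count c : Int) := by
      intro c
      rw [getD_foldl_modify_add _ _ (PySem.List.pyGetD conn a2 [])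
            (fun x => (PySem.List.pyGetD atoms x "", ((PySem.List.pyGetD conn x []).length : Int))) (-1) _ c,
          getD_foldl_modify_add _ _ (PySem.List.pyGetD conn a1 [])
            (fun x => (PySem.List.pyGetD atoms x "", ((PySem.List.pyGetD conn x []).length : Int))) 1 _ c]
      simp [pvNN, PySem.Dict.getD_empty]
      ring
    have hg2 : ∀ c, ((PySem.List.pyGetD conn a2 []).foldl
        (fun d x => (PySem.List.pyGetD conn x []).foldl
           (fun d y =>
             if y != a2 then
               d.modify (PySem.List.pyGetD atoms x "", ((PySem.List.pyGetD conn x []).length : Int),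
                         PySem.List.pyGetD atoms y "", ((PySem.List.pyGetD conn y []).length : Int)) 0 (· + (-1))
             else d) d)
        ((PySem.List.pyGetD conn a1 []).foldl
          (fun d x => (PySem.List.pyGetD conn x []).foldl
             (fun d y =>
               if y != a1 then
                 d.modify (PySem.List.pyGetD atoms x "", ((PySem.List.pyGetD conn x []).length : Int),
                           PySem.List.pyGetD atoms y "", ((PySem.List.pyGetD conn y []).length : Int)) 0 (· + 1)
               else d) d)
          PySem.Dict.empty)).getD c 0
        = ((pvNN2 atoms conn a1).count c : Int) - ((pvNN2 atoms conn a2).count c : Int) := by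
      intro c
      rw [getD_nn2_fold atoms conn a2 (-1) _ _ c, getD_nn2_fold atoms conn a1 1 _ _ c]
      simp [pvNN2, PySem.Dict.getD_empty]
      ring
    -- assemble
    simp only [Bool.and_eq_true, Bool.not_eq_true', true_and]
    rw [values_any_ne_zero_false_iff _ _ hnd1, values_any_ne_zero_false_iff _ _ hnd2]
    constructor
    · rintro ⟨hA, hB⟩
      refine ⟨List.perm_iff_count.mpr (fun c => ?_), List.perm_iff_count.mpr (fun c => ?_)⟩
      · have := hA c; rw [hg1 c] at this; omega
      · have := hB c; rw [hg2 c] at this; omega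
    · rintro ⟨hA, hB⟩
      refine ⟨fun c => ?_, fun c => ?_⟩
      · rw [hg1 c, List.perm_iff_count.mp hA c]; ring
      · rw [hg2 c, List.perm_iff_count.mp hB c]; ring
  · simp [h1]

-- ===== VERDICT (by name: the statement is the Claim_ definition above) =====
theorem local_equivalence_test_spec : Claim_equal_local_equivalence_test := by
  intro a1 a2 atoms conn _ _
  unfold Spec_local_equivalence_test
  rw [Bool.eq_iff_iff, A_true_iff, B_true_iff]
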